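-- pv_equiv track=rewrite | github.com/Rachidhssin/Valora | api/main.py | get_missing_categories
-- ===== SOURCE A (Python) =====
-- def get_missing_categories(cart_categories: set) -> list:
--     """
--     Determine what categories are missing for a complete setup.
--     Always suggests a COMPLETE setup regardless of starting product.
--     """
--     # Map cart categories to our setup categories
--     has_core = any(c in cart_categories for c in ['laptop', 'desktop'])
--     has_display = 'monitor' in cart_categories
--     has_keyboard = 'keyboard' in cart_categories
--     has_mouse = 'mouse' in cart_categories
--     has_audio = any(c in cart_categories for c in ['headset', 'speaker'])
--     has_webcam = 'webcam' in cart_categories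
--     has_gpu = 'gpu' in cart_categories
--
--     missing = []
--
--     # Always try to complete the setup
--     if not has_core:
--         missing.append('laptop')  # Suggest laptop as default core
--     if not has_display:
--         missing.append('monitor')
--     if not has_keyboard:
--         missing.append('keyboard')
--     if not has_mouse:
--         missing.append('mouse')
--     if not has_audio:
--         missing.append('headset')
--     if not has_webcam:
--         missing.append('webcam')
--     # GPU only if they have desktop or high budget
--     if not has_gpu and 'desktop' in cart_categories:
--         missing.append('gpu')
--
--     return missing
-- ===== SOURCE B (Python) =====
-- # One pass over the cart: an item->slot index maps each cart item to the setup
-- # slot it fills; suggestions are then read off the slots left unfilled.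
-- _SLOT_OF = {
--     'laptop': 'core', 'desktop': 'core',
--     'monitor': 'display',
--     'keyboard': 'keyboard',
--     'mouse': 'mouse',
--     'headset': 'audio', 'speaker': 'audio',
--     'webcam': 'webcam',
--     'gpu': 'gpu',
-- }
--
-- _SUGGEST = [('core', 'laptop'), ('display', 'monitor'), ('keyboard', 'keyboard'),
--             ('mouse', 'mouse'), ('audio', 'headset'), ('webcam', 'webcam')]
--
--
-- def get_missing_categories(cart_categories: set) -> list:
--     filled = set()
--     has_desktop = False
--     for item in cart_categories:
--         slot = _SLOT_OF.get(item)
--         if slot is not None: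
--             filled.add(slot)
--         if item == 'desktop':
--             has_desktop = True
--     missing = [sugg for slot, sugg in _SUGGEST if slot not in filled]
--     if has_desktop and 'gpu' not in filled:
--         missing.append('gpu')
--     return missing
-- ===== Notes on version B (the rewrite author's own statement) =====
-- stated objective: alternative
-- what changed: Instead of seven per-category membership scans over the cart, B makes one pass over the cart, mapping each item through an item-to-slot index into a set of filled slots, and then reads the suggestions off the unfilled slots of a fixed table.
import Mathlib
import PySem

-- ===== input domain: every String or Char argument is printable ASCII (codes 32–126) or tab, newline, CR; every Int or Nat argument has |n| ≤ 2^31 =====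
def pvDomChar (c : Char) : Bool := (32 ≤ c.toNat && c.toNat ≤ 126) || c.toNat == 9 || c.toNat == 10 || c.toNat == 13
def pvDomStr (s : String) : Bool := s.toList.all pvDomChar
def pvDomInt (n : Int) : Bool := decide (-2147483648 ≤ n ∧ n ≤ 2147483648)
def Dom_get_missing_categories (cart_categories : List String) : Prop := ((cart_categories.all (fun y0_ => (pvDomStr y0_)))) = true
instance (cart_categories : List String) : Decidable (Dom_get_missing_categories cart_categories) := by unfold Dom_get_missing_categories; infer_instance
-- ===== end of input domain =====

-- B replaces A's seven per-category membership scans with one pass over the cart through an item→slot index into a set of filled slots (alternative decomposition, same cost).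

-- ===== PORT A =====
def get_missing_categories (cart_categories : List String) : List String :=
  let has_core := (["laptop", "desktop"].any (fun c => cart_categories.contains c))
  let has_display := cart_categories.contains "monitor"
  let has_keyboard := cart_categories.contains "keyboard"
  let has_mouse := cart_categories.contains "mouse"
  let has_audio := (["headset", "speaker"].any (fun c => cart_categories.contains c))
  let has_webcam := cart_categories.contains "webcam"
  let has_gpu := cart_categories.contains "gpu"
  let missing : List String := []
  let missing := if !has_core then missing ++ ["laptop"] else missing
  let missing := if !has_display then missing ++ ["monitor"] else missing
  let missing := if !has_keyboard then missing ++ ["keyboard"] else missing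
  let missing := if !has_mouse then missing ++ ["mouse"] else missing
  let missing := if !has_audio then missing ++ ["headset"] else missing
  let missing := if !has_webcam then missing ++ ["webcam"] else missing
  let missing := if !has_gpu && cart_categories.contains "desktop" then missing ++ ["gpu"] else missing
  missing

-- ===== PORT B =====
-- _SLOT_OF.get(item) : first-match lookup in the literal dict
def pvSlotOf (item : String) : Option String :=
  PySem.Dict.get?
    (PySem.Dict.mk [("laptop", "core"), ("desktop", "core"), ("monitor", "display"),
     ("keyboard", "keyboard"), ("mouse", "mouse"), ("headset", "audio"),
     ("speaker", "audio"), ("webcam", "webcam"), ("gpu", "gpu")]) item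

def pvSuggest : List (String × String) :=
  [("core", "laptop"), ("display", "monitor"), ("keyboard", "keyboard"),
   ("mouse", "mouse"), ("audio", "headset"), ("webcam", "webcam")]

-- one loop iteration: add the item's slot to 'filled', record has_desktop
def pvStep (acc : PySem.Set String × Bool) (item : String) : PySem.Set String × Bool :=
  let acc2 := match pvSlotOf item with
    | some slot => (PySem.Set.add acc.1 slot, acc.2)
    | none => acc
  if item == "desktop" then (acc2.1, true) else acc2

def get_missing_categories_alt (cart_categories : List String) : List String :=
  let st := cart_categories.foldl pvStep (PySem.Set.empty, false)
  let missing := (pvSuggest.filter (fun p => !(PySem.Set.contains st.1 p.1))).map Prod.snd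
  if st.2 && !(PySem.Set.contains st.1 "gpu") then missing ++ ["gpu"] else missing

-- ===== PRECONDITION & SPEC =====
def Spec_get_missing_categories (cart_categories : List String) (out : List String) : Prop := out = get_missing_categories_alt cart_categories
instance (cart_categories : List String) (out : List String) : Decidable (Spec_get_missing_categories cart_categories out) := by unfold Spec_get_missing_categories; infer_instance

-- ===== CLAIM =====
def Claim_equal_get_missing_categories : Prop := ∀ (cart_categories : List String), Dom_get_missing_categories cart_categories → Spec_get_missing_categories cart_categories (get_missing_categories cart_categories)

-- ===== LEMMAS AND PROOFS =====

theorem pvSet_contains_add (s : PySem.Set String) (x y : String) :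
    (PySem.Set.add s x).contains y = (s.contains y || x == y) := by
  simp only [PySem.Set.add]
  by_cases h : PySem.Set.contains s x
  · simp only [h, if_true]
    by_cases hxy : x = y
    · subst hxy
      simp_all [PySem.Set.contains_eq_listContains]
    · have h1 : (x == y) = false := by simp [hxy]
      have h2 : ¬ y = x := fun he => hxy he.symm
      simp [h1]
  · simp only [h, Bool.false_eq_true, if_false]
    simp only [PySem.Set.contains_eq_listContains, List.contains_append]
    by_cases hxy : x = y
    · subst hxy; simp
    · have h1 : (x == y) = false := by simp [hxy]
      have h2' : ¬ y = x := fun he => hxy (Eq.symm he)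
      simp [h1, h2']

theorem pvFill_contains (slot : String) : ∀ (cart : List String) (acc : PySem.Set String) (b : Bool),
    ((cart.foldl pvStep (acc, b)).1).contains slot
      = (acc.contains slot || cart.any (fun i => pvSlotOf i == some slot)) := by
  intro cart
  induction cart with
  | nil => intro acc b; simp
  | cons i tl ih =>
    intro acc b
    have hfst : (pvStep (acc, b) i).1
        = (match pvSlotOf i with
           | some sl => PySem.Set.add acc sl
           | none => acc) := by
      unfold pvStep
      cases pvSlotOf i <;> by_cases h : i == "desktop" <;> simp [h]
    have hfold : ((i :: tl).foldl pvStep (acc, b)) = tl.foldl pvStep (pvStep (acc, b) i) := rfl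
    rw [hfold]
    rcases hstep : pvStep (acc, b) i with ⟨acc', b'⟩
    have hacc' : acc' = (match pvSlotOf i with
           | some sl => PySem.Set.add acc sl
           | none => acc) := by
      have := hfst; rw [hstep] at this; exact this
    rw [ih acc' b', hacc']
    cases hslot : pvSlotOf i with
    | none => simp [hslot]
    | some sl =>
      simp only [hslot, pvSet_contains_add, List.any_cons]
      by_cases h : sl == slot
      · have : sl = slot := eq_of_beq h
        simp [this]
      · have : ¬ sl = slot := fun he => h (by simp [he])
        simp [h]

theorem pvFill_desktop : ∀ (cart : List String) (acc : PySem.Set String) (b : Bool),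
    ((cart.foldl pvStep (acc, b)).2) = (b || cart.any (fun i => i == "desktop")) := by
  intro cart
  induction cart with
  | nil => intro acc b; simp
  | cons i tl ih =>
    intro acc b
    have hfold : ((i :: tl).foldl pvStep (acc, b)) = tl.foldl pvStep (pvStep (acc, b) i) := rfl
    rw [hfold]
    rcases hstep : pvStep (acc, b) i with ⟨acc', b'⟩
    have hb' : b' = (b || (i == "desktop")) := by
      have : (pvStep (acc, b) i).2 = (b || (i == "desktop")) := by
        unfold pvStep
        cases pvSlotOf i <;> by_cases h : i == "desktop" <;> simp [h]
      rw [hstep] at this; exact this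
    rw [ih acc' b', hb']
    simp [Bool.or_assoc]

-- pointwise: which items map to each slot
theorem pvSlot_cases (i : String) :
    ((pvSlotOf i == some "core") = (i == "laptop" || i == "desktop")) ∧
    ((pvSlotOf i == some "display") = (i == "monitor")) ∧
    ((pvSlotOf i == some "keyboard") = (i == "keyboard")) ∧
    ((pvSlotOf i == some "mouse") = (i == "mouse")) ∧
    ((pvSlotOf i == some "audio") = (i == "headset" || i == "speaker")) ∧
    ((pvSlotOf i == some "webcam") = (i == "webcam")) ∧
    ((pvSlotOf i == some "gpu") = (i == "gpu")) := by
  unfold pvSlotOf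
  by_cases h1 : i = "laptop"
  · subst h1; decide
  by_cases h2 : i = "desktop"
  · subst h2; decide
  by_cases h3 : i = "monitor"
  · subst h3; decide
  by_cases h4 : i = "keyboard"
  · subst h4; decide
  by_cases h5 : i = "mouse"
  · subst h5; decide
  by_cases h6 : i = "headset"
  · subst h6; decide
  by_cases h7 : i = "speaker"
  · subst h7; decide
  by_cases h8 : i = "webcam"
  · subst h8; decide
  by_cases h9 : i = "gpu"
  · subst h9; decide
  have e1 : (("laptop" : String) == i) = false := beq_eq_false_iff_ne.mpr (Ne.symm h1)
  have e2 : (("desktop" : String) == i) = false := beq_eq_false_iff_ne.mpr (Ne.symm h2)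
  have e3 : (("monitor" : String) == i) = false := beq_eq_false_iff_ne.mpr (Ne.symm h3)
  have e4 : (("keyboard" : String) == i) = false := beq_eq_false_iff_ne.mpr (Ne.symm h4)
  have e5 : (("mouse" : String) == i) = false := beq_eq_false_iff_ne.mpr (Ne.symm h5)
  have e6 : (("headset" : String) == i) = false := beq_eq_false_iff_ne.mpr (Ne.symm h6)
  have e7 : (("speaker" : String) == i) = false := beq_eq_false_iff_ne.mpr (Ne.symm h7)
  have e8 : (("webcam" : String) == i) = false := beq_eq_false_iff_ne.mpr (Ne.symm h8)
  have e9 : (("gpu" : String) == i) = false := beq_eq_false_iff_ne.mpr (Ne.symm h9)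
  have f1 : (i == ("laptop" : String)) = false := beq_eq_false_iff_ne.mpr h1
  have f2 : (i == ("desktop" : String)) = false := beq_eq_false_iff_ne.mpr h2
  have f3 : (i == ("monitor" : String)) = false := beq_eq_false_iff_ne.mpr h3
  have f4 : (i == ("keyboard" : String)) = false := beq_eq_false_iff_ne.mpr h4
  have f5 : (i == ("mouse" : String)) = false := beq_eq_false_iff_ne.mpr h5
  have f6 : (i == ("headset" : String)) = false := beq_eq_false_iff_ne.mpr h6
  have f7 : (i == ("speaker" : String)) = false := beq_eq_false_iff_ne.mpr h7
  have f8 : (i == ("webcam" : String)) = false := beq_eq_false_iff_ne.mpr h8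
  have f9 : (i == ("gpu" : String)) = false := beq_eq_false_iff_ne.mpr h9
  simp [PySem.Dict.get?, List.find?, e1, e2, e3, e4, e5, e6, e7, e8, e9,
    f1, f2, f3, f4, f5, f6, f7, f8, f9]

theorem pvSlot_core (i : String) : (pvSlotOf i == some "core") = (i == "laptop" || i == "desktop") := (pvSlot_cases i).1
theorem pvSlot_display (i : String) : (pvSlotOf i == some "display") = (i == "monitor") := (pvSlot_cases i).2.1
theorem pvSlot_keyboard (i : String) : (pvSlotOf i == some "keyboard") = (i == "keyboard") := (pvSlot_cases i).2.2.1
theorem pvSlot_mouse (i : String) : (pvSlotOf i == some "mouse") = (i == "mouse") := (pvSlot_cases i).2.2.2.1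
theorem pvSlot_audio (i : String) : (pvSlotOf i == some "audio") = (i == "headset" || i == "speaker") := (pvSlot_cases i).2.2.2.2.1
theorem pvSlot_webcam (i : String) : (pvSlotOf i == some "webcam") = (i == "webcam") := (pvSlot_cases i).2.2.2.2.2.1
theorem pvSlot_gpu (i : String) : (pvSlotOf i == some "gpu") = (i == "gpu") := (pvSlot_cases i).2.2.2.2.2.2

theorem pvAny_beq (cart : List String) (x : String) :
    cart.any (fun i => i == x) = cart.contains x := by
  induction cart with
  | nil => simp
  | cons i tl ih =>
    simp only [List.any_cons, ih, List.contains_cons]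
    by_cases h : i = x <;> simp [h, BEq.comm]

theorem pvAny_or (cart : List String) (f g : String → Bool) :
    cart.any (fun i => f i || g i) = (cart.any f || cart.any g) := by
  induction cart with
  | nil => simp
  | cons i tl ih =>
    simp only [List.any_cons, ih]
    cases f i <;> cases g i <;> simp

-- ===== VERDICT =====
set_option maxHeartbeats 1600000 in
theorem get_missing_categories_spec : Claim_equal_get_missing_categories := by
  intro cart _
  unfold Spec_get_missing_categories get_missing_categories get_missing_categories_alt pvSuggest
  simp only [pvFill_contains, pvFill_desktop]
  simp only [PySem.Set.contains_eq_listContains, Bool.false_or]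
  simp only [List.filter, List.any_cons, List.any_nil, Bool.or_false]
  simp only [pvSlot_core, pvSlot_display, pvSlot_keyboard,
    pvSlot_mouse, pvSlot_audio, pvSlot_webcam, pvSlot_gpu]
  simp only [pvAny_or, pvAny_beq]
  by_cases hl : cart.contains "laptop" = true <;>
  by_cases hd : cart.contains "desktop" = true <;>
  by_cases hm : cart.contains "monitor" = true <;>
  by_cases hk : cart.contains "keyboard" = true <;>
  by_cases hmo : cart.contains "mouse" = true <;>
  by_cases hh : cart.contains "headset" = true <;>
  by_cases hs : cart.contains "speaker" = true <;>
  by_cases hw : cart.contains "webcam" = true <;>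
  by_cases hg : cart.contains "gpu" = true <;>
  simp_all
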